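-- pv_equiv track=rewrite | github.com/YeonsuBaek/algorithm-test | 프로그래머스/lv0/120853. 컨트롤 제트/컨트롤 제트.py | solution
-- ===== SOURCE A (Python) =====
-- def solution(s):
--     numbers = []
--     slist = s.split(' ')
--
--     for number in slist:
--         if number == 'Z':
--             numbers.pop()
--         else:
--             numbers.append(number)
--
--     sum = 0
--     for number in numbers:
--         sum += int(number)
--
--
--     return sum
-- ===== SOURCE B (Python) =====
-- def solution(s):
--     total = 0
--     skip = 0
--     for tok in reversed(s.split(' ')):
--         if tok == 'Z':
--             skip += 1
--         elif skip:
--             skip -= 1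
--         else:
--             total += int(tok)
--     return total
-- ===== Notes on version B (the rewrite author's own statement) =====
-- stated objective: alternative
-- what changed: B scans the tokens right-to-left with only an integer skip counter (a 'Z' increments it, a number is either swallowed by a pending skip or added to the total), replacing A's left-to-right stack build followed by a summing pass; no stack or intermediate list is kept.
import Mathlib
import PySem

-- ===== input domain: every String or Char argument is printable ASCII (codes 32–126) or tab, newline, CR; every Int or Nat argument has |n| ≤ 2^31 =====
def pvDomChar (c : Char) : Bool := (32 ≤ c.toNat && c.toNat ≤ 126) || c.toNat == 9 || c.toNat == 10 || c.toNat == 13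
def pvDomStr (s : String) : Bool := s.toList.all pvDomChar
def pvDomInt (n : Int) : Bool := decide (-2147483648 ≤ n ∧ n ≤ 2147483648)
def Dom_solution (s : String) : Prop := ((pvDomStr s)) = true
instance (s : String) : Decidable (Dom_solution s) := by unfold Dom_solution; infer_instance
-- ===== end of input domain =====

-- B replaces A's stack-then-sum two-pass structure by one right-to-left pass that keeps
-- only a running total and an integer skip counter (no stack, no intermediate list).

-- ===== PORT A =====
def solution (s : String) : Int :=
  let slist := (PySem.Str.split? s " ").getD []
  let numbers := slist.foldl
    (fun numbers number =>
      if number == "Z" then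
        match PySem.List.pop? numbers with
        | some (_, rest) => rest
        | none => numbers          -- IndexError in Python; excluded by Pre_solution
      else numbers ++ [number]) []
  numbers.foldl (fun sum number => sum + (PySem.Int.ofStr? number).getD 0) 0
  -- int(number) can raise ValueError; excluded by Pre_solution

-- ===== PORT B =====
def solution_alt (s : String) : Int :=
  ((((PySem.Str.split? s " ").getD []).reverse).foldl
    (fun (st : Int × Nat) tok =>
      if tok == "Z" then (st.1, st.2 + 1)
      else if st.2 ≠ 0 then (st.1, st.2 - 1)
      else (st.1 + (PySem.Int.ofStr? tok).getD 0, st.2))   -- int(tok): ValueError excluded by Pre_solution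
    ((0 : Int), (0 : Nat))).1

-- ===== PRECONDITION & SPEC =====
def pvToks (s : String) : List String := (PySem.Str.split? s " ").getD []

-- Pre_ excludes exactly the inputs where Python raises: a 'Z' arriving with no pending
-- number (A's numbers.pop() raises IndexError there; B, whose counter just accumulates,
-- may return instead), and a surviving (uncancelled) token that is not a valid int
-- literal (both programs raise ValueError on int() of it).
def Pre_solution (s : String) : Prop :=
  (∀ n, n ≤ (pvToks s).length → 2 * (((pvToks s).take n).count "Z") ≤ n) ∧
  (∀ i, i < (pvToks s).length → (pvToks s).getD i "" ≠ "Z" →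
     (∀ k, k ≤ (pvToks s).length → 2 * ((((pvToks s).drop (i + 1)).take k).count "Z") ≤ k) →
     (PySem.Int.ofStr? ((pvToks s).getD i "")).isSome = true)
instance (s : String) : Decidable (Pre_solution s) := by unfold Pre_solution; infer_instance
def pvWitness_solution : String := "1 2 Z 3"

def Spec_solution (s : String) (out : Int) : Prop := out = solution_alt s
instance (s : String) (out : Int) : Decidable (Spec_solution s out) := by unfold Spec_solution; infer_instance

-- ===== CLAIM (what is proved, stated in full; the proofs are below) =====
def Claim_equal_solution : Prop := ∀ (s : String), Dom_solution s → Pre_solution s → Spec_solution s (solution s)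

-- ===== LEMMAS AND PROOFS =====

-- abbreviations for the two loop bodies (definitionally equal to the ports' lambdas)
def pvV (t : String) : Int := (PySem.Int.ofStr? t).getD 0

def pvA (ns : List String) (t : String) : List String :=
  if t == "Z" then
    match PySem.List.pop? ns with
    | some (_, rest) => rest
    | none => ns
  else ns ++ [t]

def pvG (l : List String) : Int × Nat :=
  l.foldr
    (fun tok st =>
      if tok == "Z" then (st.1, st.2 + 1)
      else if st.2 ≠ 0 then (st.1, st.2 - 1)
      else (st.1 + pvV tok, st.2)) ((0 : Int), (0 : Nat))

-- Invariant: under no stack underflow, the sum of A's final stack (parsed) equals the sum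
-- of the untouched bottom of the initial stack plus B's right-to-left running total.
lemma pv_key (l : List String) : ∀ (ns : List String),
    (∀ n, n ≤ l.length → 2 * ((l.take n).count "Z") ≤ ns.length + n) →
    ((l.foldl pvA ns).map pvV).sum
      = ((ns.take (ns.length - (pvG l).2)).map pvV).sum + (pvG l).1 := by
  induction l with
  | nil => intro ns _; simp [pvG]
  | cons t rest ih =>
    intro ns H
    by_cases ht : t = "Z"
    · subst ht
      have hlen : 1 ≤ ns.length := by
        have := H 1 (by simp)
        simp [List.take_succ_cons] at this
        omega
      have hns : ns ≠ [] := by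
        cases ns with
        | nil => simp at hlen
        | cons _ _ => simp
      obtain ⟨ys, y, rfl⟩ : ∃ ys y, ns = ys ++ [y] :=
        ⟨ns.dropLast, ns.getLast hns, (List.dropLast_append_getLast hns).symm⟩
      have H' : ∀ n, n ≤ rest.length → 2 * ((rest.take n).count "Z") ≤ ys.length + n := by
        intro n hn
        have := H (n + 1) (by simp; omega)
        simp [List.take_succ_cons] at this
        omega
      have hIH := ih ys H'
      have hstep : (("Z" :: rest).foldl pvA (ys ++ [y])) = rest.foldl pvA ys := by
        simp [pvA, PySem.List.pop?_last]
      have hcons : pvG ("Z" :: rest)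
          = (if ("Z" : String) == "Z" then ((pvG rest).1, (pvG rest).2 + 1)
             else if (pvG rest).2 ≠ 0 then ((pvG rest).1, (pvG rest).2 - 1)
             else ((pvG rest).1 + pvV "Z", (pvG rest).2)) := rfl
      have hg : pvG ("Z" :: rest) = ((pvG rest).1, (pvG rest).2 + 1) := by
        rw [hcons]; simp
      rw [hstep, hg, hIH]
      have htake : (ys ++ [y]).take ((ys ++ [y]).length - ((pvG rest).2 + 1))
          = ys.take (ys.length - (pvG rest).2) := by
        have h1 : (ys ++ [y]).length - ((pvG rest).2 + 1) = ys.length - (pvG rest).2 := by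
          simp only [List.length_append, List.length_cons, List.length_nil]; omega
        rw [h1, List.take_append_of_le_length (by omega)]
      rw [htake]
    · have H' : ∀ n, n ≤ rest.length →
          2 * ((rest.take n).count "Z") ≤ (ns ++ [t]).length + n := by
        intro n hn
        have := H (n + 1) (by simp; omega)
        simp [List.take_succ_cons, ht] at this
        simp
        omega
      have hIH := ih (ns ++ [t]) H'
      have hstep : ((t :: rest).foldl pvA ns) = rest.foldl pvA (ns ++ [t]) := by
        simp [pvA, ht]
      rw [hstep, hIH]
      have hcons : pvG (t :: rest)
          = (if t == "Z" then ((pvG rest).1, (pvG rest).2 + 1)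
             else if (pvG rest).2 ≠ 0 then ((pvG rest).1, (pvG rest).2 - 1)
             else ((pvG rest).1 + pvV t, (pvG rest).2)) := rfl
      by_cases hk : (pvG rest).2 = 0
      · have hg : pvG (t :: rest) = ((pvG rest).1 + pvV t, (pvG rest).2) := by
          rw [hcons]; simp [ht, hk]
        rw [hg, hk]
        simp
        ring
      · have hg : pvG (t :: rest) = ((pvG rest).1, (pvG rest).2 - 1) := by
          rw [hcons]; simp [ht, hk]
        rw [hg]
        have htake : (ns ++ [t]).take ((ns ++ [t]).length - (pvG rest).2)
            = ns.take (ns.length - ((pvG rest).2 - 1)) := by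
          have h1 : (ns ++ [t]).length - (pvG rest).2 = ns.length - ((pvG rest).2 - 1) := by
            simp; omega
          rw [h1, List.take_append_of_le_length (by omega)]
        rw [htake]

-- ===== VERDICT (by name: the statement is the Claim_ definition above) =====
theorem solution_spec : Claim_equal_solution := by
  intro s _ hpre
  unfold Spec_solution solution solution_alt
  obtain ⟨hu, _⟩ := hpre
  have key := pv_key ((PySem.Str.split? s " ").getD []) []
    (by intro n hn; simpa using hu n (by simpa [pvToks] using hn))
  simp only [List.take_nil, List.map_nil, List.sum_nil, zero_add] at key
  rw [List.foldl_reverse]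
  show List.foldl (fun sum number => sum + pvV number) 0
      (List.foldl pvA [] ((PySem.Str.split? s " ").getD []))
    = (pvG ((PySem.Str.split? s " ").getD [])).1
  rw [PySem.List.foldl_add (g := pvV)]
  simpa using key
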